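-- pv_equiv track=rewrite | github.com/SDET-Krunal/Python-Interview-Programs | String_Programs/MinDirectionCount.py | min_directions_count
-- ===== SOURCE A (Python) =====
-- def min_directions_count(direction_str: str):
--     directions = {}
--
--     for i in range(len(direction_str)):
--         if direction_str[i] in directions.keys():
--             directions[direction_str[i]] = directions[direction_str[i]] + 1
--         else:
--             directions[direction_str[i]] = 1
--
--     min_directions = min(directions.values())
--
--     return min_directions if (min_directions != len(direction_str)) else 0
-- ===== SOURCE B (Python) =====
-- def min_directions_count(direction_str: str):
--     # Sort the characters, then scan once: equal characters become one run
--     # whose length is that character's frequency.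
--     s = sorted(direction_str)
--     runs = []
--     i = 0
--     while i < len(s):
--         j = i
--         while j < len(s) and s[j] == s[i]:
--             j += 1
--         runs.append(j - i)
--         i = j
--     m = min(runs)
--     return 0 if m == len(s) else m
-- ===== Notes on version B (the rewrite author's own statement) =====
-- stated objective: alternative
-- what changed: Replaces A's dict-of-counts loop with sorting the string and scanning it once, reading each character's frequency off the lengths of runs of equal adjacent characters.
import Mathlib
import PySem

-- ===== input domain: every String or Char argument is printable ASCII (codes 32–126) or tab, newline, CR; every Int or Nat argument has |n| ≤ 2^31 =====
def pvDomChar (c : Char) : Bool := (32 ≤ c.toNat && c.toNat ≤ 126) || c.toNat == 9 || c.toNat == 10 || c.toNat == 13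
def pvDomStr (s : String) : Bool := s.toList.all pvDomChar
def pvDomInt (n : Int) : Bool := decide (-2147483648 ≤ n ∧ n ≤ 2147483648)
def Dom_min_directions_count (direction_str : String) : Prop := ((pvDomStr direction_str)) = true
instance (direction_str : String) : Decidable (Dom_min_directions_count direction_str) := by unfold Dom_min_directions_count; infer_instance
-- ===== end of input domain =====

-- B sorts the string and reads each character's frequency off the run lengths of equal
-- adjacent characters, instead of A's dict-of-counts loop; objective: alternative.

-- ===== PORT A =====
def min_directions_count (direction_str : String) : Int :=
  let cs := direction_str.toList
  let directions := (PySem.List.pyRange 0 (PySem.List.len cs)).foldl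
    (fun d i =>
      let c := PySem.List.pyGetD cs i ' '
      if d.contains c then d.insert c (d.getD c 0 + 1) else d.insert c 1)
    PySem.Dict.empty
  match PySem.List.min? directions.values (fun x => x) with
  | some m => if m ≠ (cs.length : Int) then m else 0
  | none => 0  -- min([]) raises ValueError in Python; excluded by Pre_

-- ===== PORT B =====
-- the inner 'while s[j] == s[i]' loop: length of the run of s's head character
def groupRuns (s : List Char) : List Int :=
  match s with
  | [] => []
  | c :: t =>
    (1 + ((t.takeWhile (· == c)).length : Int)) :: groupRuns (t.dropWhile (· == c))
termination_by s.length
decreasing_by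
  simp only [List.length_cons]
  exact Nat.lt_succ_of_le (List.dropWhile_sublist _).length_le

def min_directions_count_alt (direction_str : String) : Int :=
  let s := PySem.List.sorted direction_str.toList (fun c => c) false
  let runs := groupRuns s
  match PySem.List.min? runs (fun x => x) with
  | some m => if m = (s.length : Int) then 0 else m
  | none => -1  -- min([]) raises ValueError in Python; excluded by Pre_

-- ===== PRECONDITION & SPEC =====
-- On the empty string A's min(directions.values()) raises ValueError (and so does B's min(runs)).
def Pre_min_directions_count (direction_str : String) : Prop := direction_str.toList ≠ []
instance (direction_str : String) : Decidable (Pre_min_directions_count direction_str) := by unfold Pre_min_directions_count; infer_instance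

def pvWitness_min_directions_count : String := "aab"

def Spec_min_directions_count (direction_str : String) (out : Int) : Prop := out = min_directions_count_alt direction_str
instance (direction_str : String) (out : Int) : Decidable (Spec_min_directions_count direction_str out) := by unfold Spec_min_directions_count; infer_instance

-- ===== CLAIM (what is proved, stated in full; the proofs are below) =====
def Claim_equal_min_directions_count : Prop := ∀ (direction_str : String), Dom_min_directions_count direction_str → Pre_min_directions_count direction_str → Spec_min_directions_count direction_str (min_directions_count direction_str)

-- ===== LEMMAS AND PROOFS =====

-- A's two branches are both 'insert c (getD c 0 + 1)': a missing key reads as 0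
theorem dict_body_collapse (d : PySem.Dict Char Int) (c : Char) :
    (if d.contains c then d.insert c (d.getD c 0 + 1) else d.insert c 1) =
      d.insert c (d.getD c 0 + 1) := by
  by_cases h : d.contains c = true
  · simp [h]
  · have hg : d.getD c 0 = 0 := by
      simp only [PySem.Dict.getD, PySem.Dict.get?, PySem.Dict.contains, List.any_eq_true] at *
      rw [List.find?_eq_none.mpr]
      · rfl
      · intro p hp; by_contra hb
        exact h ⟨p, hp, by simpa using hb⟩
    simp [h, hg]

-- 'for i in range(len(cs)): … cs[i] …' visits exactly the characters of cs
theorem foldl_pyRange_chars {beta : Type} (cs : List Char) (g : beta → Char → beta) (init : beta) :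
    (PySem.List.pyRange 0 (PySem.List.len cs)).foldl
      (fun d i => g d (PySem.List.pyGetD cs i ' ')) init = cs.foldl g init := by
  rw [← List.foldl_map, PySem.List.map_pyGetD_pyRange_zero]

-- A's loop builds Counter(direction_str)
theorem a_dict_eq_counter (cs : List Char) :
    (PySem.List.pyRange 0 (PySem.List.len cs)).foldl
      (fun d i =>
        let c := PySem.List.pyGetD cs i ' '
        if d.contains c then d.insert c (d.getD c 0 + 1) else d.insert c 1)
      PySem.Dict.empty = PySem.Dict.counter cs := by
  have h1 := foldl_pyRange_chars cs
    (fun (d : PySem.Dict Char Int) c =>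
      if d.contains c then d.insert c (d.getD c 0 + 1) else d.insert c 1)
    (PySem.Dict.empty : PySem.Dict Char Int)
  have h2 := PySem.List.foldl_congr_mem cs
    (fun d c => if d.contains c then d.insert c (d.getD c 0 + 1) else d.insert c 1)
    (fun d c => d.insert c (d.getD c 0 + 1)) PySem.Dict.empty
    (fun d c _ => dict_body_collapse d c)
  exact h1.trans (h2.trans (PySem.Dict.foldl_insert_getD_add_one_eq_counter cs))

-- membership in Counter's values: exactly the frequencies of the characters that occur
theorem mem_counter_values (cs : List Char) (x : Int) :
    x ∈ (PySem.Dict.counter cs).values ↔ ∃ c ∈ cs, x = (cs.count c : Int) := by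
  show x ∈ (PySem.Dict.counter cs).items.map (·.2) ↔ _
  rw [PySem.Dict.items_counter]
  simp only [List.map_map, List.mem_map, Function.comp]
  constructor
  · rintro ⟨c, hc, rfl⟩
    exact ⟨c, (PySem.Set.mem_ofList cs c).mp hc, rfl⟩
  · rintro ⟨c, hc, rfl⟩
    exact ⟨c, (PySem.Set.mem_ofList cs c).mpr hc, rfl⟩

-- every element of a sorted list's tail beyond the dropped run of its head is strictly larger
theorem rest_gt (c : Char) (t : List Char) (hp : (c :: t).Pairwise (· ≤ ·)) :
    ∀ x ∈ t.dropWhile (· == c), c < x := by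
  have hle : ∀ x ∈ t, c ≤ x := (List.pairwise_cons.mp hp).1
  have hpt : (t.dropWhile (· == c)).Pairwise (· ≤ ·) :=
    List.Pairwise.sublist (List.dropWhile_sublist _) (List.pairwise_cons.mp hp).2
  cases hrest : t.dropWhile (· == c) with
  | nil => intro x hx; simp at hx
  | cons h r =>
    have hhd : ¬ (h == c) = true := by
      have := List.head?_dropWhile_not (p := (· == c)) (l := t)
      rw [hrest] at this; simpa using this
    have hch : c < h := by
      have h1 : c ≤ h := hle h ((List.dropWhile_sublist _).subset (hrest ▸ List.mem_cons_self))
      have h2 : h ≠ c := by simpa using hhd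
      exact lt_of_le_of_ne h1 (Ne.symm h2)
    intro x hx
    rcases List.mem_cons.mp hx with rfl | hx
    · exact hch
    · rw [hrest] at hpt
      exact lt_of_lt_of_le hch ((List.pairwise_cons.mp hpt).1 x hx)

-- on a sorted list, the run lengths are exactly the frequencies of the occurring characters
theorem mem_groupRuns (s : List Char) (hs : s.Pairwise (· ≤ ·)) (x : Int) :
    x ∈ groupRuns s ↔ ∃ c ∈ s, x = (s.count c : Int) := by
  induction s using groupRuns.induct with
  | case1 => simp [groupRuns]
  | case2 c t ih =>
    have hgt := rest_gt c t hs
    have hpre : ∀ y ∈ t.takeWhile (· == c), y = c := by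
      intro y hy; simpa using List.mem_takeWhile_imp hy
    have hsplit : t = t.takeWhile (· == c) ++ t.dropWhile (· == c) :=
      (List.takeWhile_append_dropWhile).symm
    have hcnot : c ∉ t.dropWhile (· == c) := fun h => lt_irrefl c (hgt c h)
    have hcount_head : ((c :: t).count c : Int) = 1 + ((t.takeWhile (· == c)).length : Int) := by
      have ht : t.count c = (t.takeWhile (· == c)).length := by
        conv_lhs => rw [hsplit]
        rw [List.count_append,
          List.count_eq_length.mpr (fun y hy => (hpre y hy).symm),
          List.count_eq_zero.mpr hcnot]
        omega
      rw [List.count_cons_self, ht]; push_cast; ring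
    have hrest_count : ∀ c' ∈ t.dropWhile (· == c),
        ((c :: t).count c' : Int) = ((t.dropWhile (· == c)).count c' : Int) := by
      intro c' hc'
      have hne : c' ≠ c := fun h => lt_irrefl c (h ▸ hgt c' hc')
      have h1 : t.count c' = (t.dropWhile (· == c)).count c' := by
        conv_lhs => rw [hsplit]
        rw [List.count_append, List.count_eq_zero.mpr (fun h => hne (hpre c' h))]
        simp
      simp [List.count_cons, h1]
      exact fun h => hne h.symm
    have hrest_pw : (t.dropWhile (· == c)).Pairwise (· ≤ ·) :=
      List.Pairwise.sublist (List.dropWhile_sublist _) (List.pairwise_cons.mp hs).2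
    rw [groupRuns]
    simp only [List.mem_cons]
    constructor
    · rintro (rfl | hx)
      · exact ⟨c, Or.inl rfl, hcount_head.symm⟩
      · rcases (ih hrest_pw).mp hx with ⟨c', hc', rfl⟩
        exact ⟨c', Or.inr ((List.dropWhile_sublist _).subset hc'), (hrest_count c' hc').symm⟩
    · rintro ⟨c', hc', rfl⟩
      by_cases hcc : c' = c
      · subst hcc; exact Or.inl hcount_head
      · have hct : c' ∈ t := by
          rcases hc' with h | h
          · exact absurd h hcc
          · exact h
        have hcd : c' ∈ t.dropWhile (· == c) := by
          rw [hsplit] at hct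
          rcases List.mem_append.mp hct with h | h
          · exact absurd (hpre c' h) hcc
          · exact h
        exact Or.inr ((ih hrest_pw).mpr ⟨c', hcd, hrest_count c' hcd⟩)

-- Python min() of two integer lists with the same elements is the same value
theorem min?_eq_of_mem_iff (l₁ l₂ : List Int) (h : ∀ x, x ∈ l₁ ↔ x ∈ l₂) :
    PySem.List.min? l₁ (fun x => x) = PySem.List.min? l₂ (fun x => x) := by
  cases h1 : PySem.List.min? l₁ (fun x => x) with
  | none =>
    rcases (PySem.List.min?_eq_none_iff l₁ _).mp h1 with rfl
    cases h2 : PySem.List.min? l₂ (fun x => x) with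
    | none => rfl
    | some m => exact absurd ((h m).mpr (PySem.List.min?_mem h2)) (by simp)
  | some m =>
    cases h2 : PySem.List.min? l₂ (fun x => x) with
    | none =>
      rcases (PySem.List.min?_eq_none_iff l₂ _).mp h2 with rfl
      exact absurd ((h m).mp (PySem.List.min?_mem h1)) (by simp)
    | some m' =>
      have hle : m ≤ m' := PySem.List.min?_isMin h1 m' ((h m').mpr (PySem.List.min?_mem h2))
      have hge : m' ≤ m := PySem.List.min?_isMin h2 m ((h m).mp (PySem.List.min?_mem h1))
      exact congrArg some (le_antisymm hle hge)

-- ===== VERDICT (by name: the statement is the Claim_ definition above) =====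
theorem min_directions_count_spec : Claim_equal_min_directions_count := by
  intro ds _ hpre
  unfold Pre_min_directions_count at hpre
  unfold Spec_min_directions_count min_directions_count min_directions_count_alt
  simp only [a_dict_eq_counter]
  set cs := ds.toList with hcs
  set s := PySem.List.sorted cs (fun c => c) false with hsdef
  have hperm : s.Perm cs := PySem.List.sorted_perm cs (fun c => c) false
  have hmem : ∀ x, x ∈ groupRuns s ↔ x ∈ (PySem.Dict.counter cs).values := by
    intro x
    rw [mem_groupRuns s (PySem.List.sorted_pairwise cs (fun c => c)) x, mem_counter_values]
    constructor
    · rintro ⟨c, hc, rfl⟩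
      exact ⟨c, hperm.mem_iff.mp hc, by rw [hperm.count_eq]⟩
    · rintro ⟨c, hc, rfl⟩
      exact ⟨c, hperm.mem_iff.mpr hc, by rw [hperm.count_eq]⟩
  have hminEq : PySem.List.min? (PySem.Dict.counter cs).values (fun x => x) =
      PySem.List.min? (groupRuns s) (fun x => x) :=
    min?_eq_of_mem_iff _ _ (fun x => (hmem x).symm)
  rw [hminEq]
  have hlen : s.length = cs.length := hperm.length_eq
  cases hm : PySem.List.min? (groupRuns s) (fun x => x) with
  | none =>
    exfalso
    have hs0 : s = [] := by
      have h0 : groupRuns s = [] := (PySem.List.min?_eq_none_iff _ _).mp hm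
      cases hseq : s with
      | nil => rfl
      | cons a b => rw [hseq, groupRuns] at h0; exact absurd h0 (by simp)
    exact hpre ((hs0 ▸ hperm).symm.eq_nil)
  | some m =>
    rw [hlen]
    by_cases hmn : m = (cs.length : Int) <;> simp [hmn]
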